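-- pv_equiv track=rewrite | github.com/Nerosas/AdventOfCode2020 | Day 6/code/challenge2.py | group_answers
-- ===== SOURCE A (Python) =====
-- def group_answers(answers_list):
--     count = 0
--     item = 0
--     count_list = []
--     while item < len(answers_list):
--         next_item = item + 1
--         try:
--             if answers_list[next_item] != '':
--                 answers_list[item] += answers_list[next_item]
--                 del answers_list[next_item]
--                 item -= 1
--                 count += 1
--             else:
--                 count_list.append(count)
--                 count = 0
--         except IndexError:
--             count_list.append(count)
--             return answers_list, count_list
--         item += 1
--     return answers_list, count_list
-- ===== SOURCE B (Python) =====
-- def group_answers(answers_list):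
--     # Note: A mutates answers_list in place; B does not (return value is identical).
--     if not answers_list:
--         return answers_list, []
--     merged = []
--     counts = []
--     cur = answers_list[0]
--     count = 0
--     for x in answers_list[1:]:
--         if x != '':
--             cur += x
--             count += 1
--         else:
--             merged.append(cur)
--             counts.append(count)
--             cur = ''
--             count = 0
--     merged.append(cur)
--     counts.append(count)
--     return merged, counts
-- ===== Notes on version B (the rewrite author's own statement) =====
-- stated objective: faster
-- what changed: A repeatedly merges the next non-empty line into the current one and deletes it from the list in place (each deletion shifts the tail, O(n^2)); B makes a single forward pass that accumulates the current group string and merge count and appends them when a blank line or the end is reached, never mutating the input.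
import Mathlib
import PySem

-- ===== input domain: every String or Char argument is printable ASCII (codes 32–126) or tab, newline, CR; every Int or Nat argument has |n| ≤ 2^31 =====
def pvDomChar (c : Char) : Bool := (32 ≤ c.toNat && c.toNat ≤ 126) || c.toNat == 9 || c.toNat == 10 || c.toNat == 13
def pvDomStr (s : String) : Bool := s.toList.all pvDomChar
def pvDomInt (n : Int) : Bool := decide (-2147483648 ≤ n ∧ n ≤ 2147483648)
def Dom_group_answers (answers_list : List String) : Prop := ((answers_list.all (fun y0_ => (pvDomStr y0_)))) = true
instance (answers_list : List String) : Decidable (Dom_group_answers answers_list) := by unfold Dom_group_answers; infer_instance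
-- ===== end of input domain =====

-- B replaces A's quadratic in-place-deletion loop with one linear forward pass (objective: faster).
-- A mutates its argument in place; the equivalence proved here is about the return value only (B does not mutate).


-- ===== PORT A =====
-- A's while loop: at index `item`, try to read `item+1`; merge it in and delete it
-- (net effect: same item, list one shorter), or on '' append `count` and advance;
-- IndexError (item+1 out of range) appends count and returns.
def groupAnswersLoopA (l : List String) (item : Nat) (count : Int) (cl : List Int) :
    List String × List Int :=
  if h : item < l.length then
    if h2 : item + 1 < l.length then
      if l[item + 1] ≠ "" then
        groupAnswersLoopA ((l.set item (l[item] ++ l[item + 1])).eraseIdx (item + 1))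
          item (count + 1) cl
      else
        groupAnswersLoopA l (item + 1) 0 (cl ++ [count])
    else
      (l, cl ++ [count])
  else
    (l, cl)
termination_by l.length - item
decreasing_by
  · simp only [List.length_eraseIdx, List.length_set]
    split <;> omega
  · omega

def group_answers (answers_list : List String) : List String × List Int :=
  groupAnswersLoopA answers_list 0 0 []

-- ===== PORT B =====
-- B's single forward pass: accumulate the current group string and its merge count.
def groupAnswersLoopB (cur : String) (count : Int) (merged : List String)
    (counts : List Int) : List String → List String × List Int
  | [] => (merged ++ [cur], counts ++ [count])
  | x :: xs =>
    if x ≠ "" then groupAnswersLoopB (cur ++ x) (count + 1) merged counts xs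
    else groupAnswersLoopB "" 0 (merged ++ [cur]) (counts ++ [count]) xs

def group_answers_alt (answers_list : List String) : List String × List Int :=
  match answers_list with
  | [] => ([], [])
  | h :: t => groupAnswersLoopB h 0 [] [] t

-- ===== PRECONDITION & SPEC =====
def Spec_group_answers (answers_list : List String) (out : List String × List Int) : Prop := out = group_answers_alt answers_list
instance (answers_list : List String) (out : List String × List Int) : Decidable (Spec_group_answers answers_list out) := by unfold Spec_group_answers; infer_instance

-- ===== CLAIM (what is proved, stated in full; the proofs are below) =====
def Claim_equal_group_answers : Prop := ∀ (answers_list : List String), Dom_group_answers answers_list → Spec_group_answers answers_list (group_answers answers_list)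

-- ===== LEMMAS AND PROOFS =====

-- Invariant: A's list is (emitted groups) ++ current group ++ unread rest, with item pointing at the current group.
theorem groupAnswersLoop_agree (rest : List String) :
    ∀ (merged : List String) (cur : String) (count : Int) (cl : List Int),
    groupAnswersLoopA (merged ++ cur :: rest) merged.length count cl =
      groupAnswersLoopB cur count merged cl rest := by
  induction rest with
  | nil =>
    intro merged cur count cl
    rw [groupAnswersLoopA]
    simp [groupAnswersLoopB]
  | cons x xs ih =>
    intro merged cur count cl
    rw [groupAnswersLoopA]
    have hlen : merged.length < (merged ++ cur :: x :: xs).length := by simp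
    have hlen2 : merged.length + 1 < (merged ++ cur :: x :: xs).length := by simp
    simp only [dif_pos hlen, dif_pos hlen2]
    have hget1 : (merged ++ cur :: x :: xs)[merged.length]'hlen = cur := by
      simp
    have hget2 : (merged ++ cur :: x :: xs)[merged.length + 1]'hlen2 = x := by
      rw [List.getElem_append_right (by omega)]
      simp
    rw [hget1, hget2]
    by_cases hx : x = ""
    · subst hx
      rw [if_neg (by simp)]
      have : merged.length + 1 = (merged ++ [cur]).length := by simp
      rw [show merged ++ cur :: "" :: xs = (merged ++ [cur]) ++ "" :: xs by simp, this,
        ih (merged ++ [cur]) "" 0 (cl ++ [count])]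
      simp [groupAnswersLoopB]
    · simp only [ne_eq, hx, not_false_eq_true, if_pos]
      have hset : (merged ++ cur :: x :: xs).set merged.length (cur ++ x) =
          merged ++ (cur ++ x) :: x :: xs := by
        rw [List.set_append_right _ _ (le_refl _)]
        simp
      have herase : (merged ++ (cur ++ x) :: x :: xs).eraseIdx (merged.length + 1) =
          merged ++ (cur ++ x) :: xs := by
        rw [show merged ++ (cur ++ x) :: x :: xs = (merged ++ [cur ++ x]) ++ x :: xs by simp,
          List.eraseIdx_append_of_length_le (by simp)]
        simp
      rw [hset, herase, ih merged (cur ++ x) (count + 1) cl]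
      simp [groupAnswersLoopB, hx]

-- ===== VERDICT (by name: the statement is the Claim_ definition above) =====
theorem group_answers_spec : Claim_equal_group_answers := by
  intro l _
  unfold Spec_group_answers group_answers group_answers_alt
  cases l with
  | nil => rw [groupAnswersLoopA]; simp
  | cons h t =>
    have := groupAnswersLoop_agree t [] h 0 []
    simpa using this
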